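-- pv_equiv track=rewrite | github.com/ZSvedic/STIRR | src-cli-min/stirr-tree.py | build_casefold_tags
-- ===== SOURCE A (Python) =====
-- from collections import Counter
--
-- def build_casefold_tags(tags):
--     """Builds case-insensitive counts preserving first-seen canonical casing and order."""
--     counts = Counter()
--     canonical = {}
--     order = {}
--     for index, tag in enumerate(tags):
--         key = tag.lower()
--         counts[key] += 1
--         if key not in canonical:
--             canonical[key] = tag
--             order[key] = index
--     return counts, canonical, order
-- ===== SOURCE B (Python) =====
-- from collections import Counter
--
-- def build_casefold_tags(tags):
--     """Group once by folded key, then derive counts/canonical/order as projections."""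
--     groups = {}
--     for item in enumerate(tags):
--         groups.setdefault(item[1].lower(), []).append(item)
--     counts = Counter({k: len(v) for k, v in groups.items()})
--     canonical = {k: v[0][1] for k, v in groups.items()}
--     order = {k: v[0][0] for k, v in groups.items()}
--     return counts, canonical, order
-- ===== Notes on version B (the rewrite author's own statement) =====
-- stated objective: alternative
-- what changed: Replaces three parallel incrementally-updated maps (Counter + canonical dict + order dict maintained together in one loop) by a single grouping pass indexing enumerated tags under their folded key, from which counts, canonical casing and first-seen order are derived afterwards as three projections of the group index.
import Mathlib
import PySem

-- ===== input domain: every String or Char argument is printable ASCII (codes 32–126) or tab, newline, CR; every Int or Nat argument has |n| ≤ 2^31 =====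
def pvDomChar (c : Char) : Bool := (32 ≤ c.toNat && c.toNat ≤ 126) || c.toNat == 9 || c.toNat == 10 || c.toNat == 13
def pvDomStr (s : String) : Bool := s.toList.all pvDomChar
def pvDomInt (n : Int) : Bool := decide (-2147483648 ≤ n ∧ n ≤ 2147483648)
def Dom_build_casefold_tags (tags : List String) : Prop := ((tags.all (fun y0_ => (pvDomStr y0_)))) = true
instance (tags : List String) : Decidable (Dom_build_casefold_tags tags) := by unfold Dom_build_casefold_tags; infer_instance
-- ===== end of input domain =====

-- B groups the enumerated tags once under their folded key and derives counts/canonical/order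
-- as projections of that single index, instead of A's three parallel maps updated in one loop.

-- ===== PORT A =====
def build_casefold_tags (tags : List String) : (List (String × Int)) × (List (String × String)) × (List (String × Int)) :=
  let fin := (PySem.List.enumerate tags 0).foldl
    (fun s p =>
      let key := PySem.Str.lower p.2
      let counts := s.1.modify key 0 (· + 1)      -- counts[key] += 1 (Counter default 0)
      if s.2.1.contains key then (counts, s.2.1, s.2.2)
      else (counts, s.2.1.insert key p.2, s.2.2.insert key p.1))
    ((PySem.Dict.empty, PySem.Dict.empty, PySem.Dict.empty) :
      PySem.Dict String Int × PySem.Dict String String × PySem.Dict String Int)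
  (fin.1.items, fin.2.1.items, fin.2.2.items)

-- ===== PORT B =====
def build_casefold_tags_alt (tags : List String) : (List (String × Int)) × (List (String × String)) × (List (String × Int)) :=
  let groups : PySem.Dict String (List (Int × String)) :=
    (PySem.List.enumerate tags 0).foldl
      (fun g p => g.modify (PySem.Str.lower p.2) [] (· ++ [p]))   -- setdefault(key, []).append(item)
      PySem.Dict.empty
  -- v[0] on the (always nonempty) group lists, ported as pyGetD with an unused default
  let counts : PySem.Dict String Int :=
    PySem.Dict.mk (groups.items.map (fun q => (q.1, (q.2.length : Int))))
  let canonical : PySem.Dict String String :=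
    PySem.Dict.mk (groups.items.map (fun q => (q.1, (PySem.List.pyGetD q.2 0 (0, "")).2)))
  let order : PySem.Dict String Int :=
    PySem.Dict.mk (groups.items.map (fun q => (q.1, (PySem.List.pyGetD q.2 0 (0, "")).1)))
  (counts.items, canonical.items, order.items)

-- ===== PRECONDITION & SPEC =====
def Spec_build_casefold_tags (tags : List String) (out : (List (String × Int)) × (List (String × String)) × (List (String × Int))) : Prop := out = build_casefold_tags_alt tags
instance (tags : List String) (out : (List (String × Int)) × (List (String × String)) × (List (String × Int))) : Decidable (Spec_build_casefold_tags tags out) := by unfold Spec_build_casefold_tags; infer_instance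

-- ===== CLAIM (what is proved, stated in full; the proofs are below) =====
def Claim_equal_build_casefold_tags : Prop := ∀ (tags : List String), Dom_build_casefold_tags tags → Spec_build_casefold_tags tags (build_casefold_tags tags)

-- ===== LEMMAS AND PROOFS =====

theorem pvGetSetdefault {ν : Type} (v : (Int × String) → ν) (L : List (Int × String))
    (d : PySem.Dict String ν) (c : String) :
    (L.foldl (fun d p => d.setdefault (PySem.Str.lower p.2) (v p)) d).get? c
      = (d.get? c).or ((L.find? (fun p => PySem.Str.lower p.2 == c)).map v) := by
  induction L generalizing d with
  | nil => cases h : d.get? c <;> simp [h]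
  | cons p rest ih =>
    simp only [List.foldl_cons, ih]
    by_cases hk : PySem.Str.lower p.2 = c
    · subst hk
      rw [List.find?_cons_of_pos (by simp)]
      rw [PySem.Dict.get?_setdefault_self]
      cases h : d.get? (PySem.Str.lower p.2) <;> simp
    · rw [List.find?_cons_of_neg (by simp [hk])]
      rw [PySem.Dict.get?_setdefault_of_ne _ _ (fun h => hk h.symm)]

theorem pvKeysSetdefault {ν : Type} (v : (Int × String) → ν) (L : List (Int × String))
    (d : PySem.Dict String ν) :
    (L.foldl (fun d p => d.setdefault (PySem.Str.lower p.2) (v p)) d).keys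
      = PySem.Set.update d.keys (L.map (fun p => PySem.Str.lower p.2)) := by
  induction L generalizing d with
  | nil => simp [PySem.Set.update]
  | cons p rest ih =>
    simp only [List.foldl_cons, List.map_cons, PySem.Set.update_cons, ih]
    congr 1
    by_cases hc : d.contains (PySem.Str.lower p.2) = true
    · rw [PySem.Dict.setdefault_of_contains _ _ hc,
        PySem.Set.add_of_mem ((PySem.Dict.contains_iff_mem_keys _ _).mp hc)]
    · rw [PySem.Dict.setdefault_of_not_contains _ _ (by simpa using hc),
        PySem.Dict.keys_insert_of_not_contains _ _ (by simpa using hc),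
        PySem.Set.add_of_not_mem]
      intro hm
      exact hc ((PySem.Dict.contains_iff_mem_keys _ _).mpr hm)

theorem pvAfold (L : List (Int × String)) (c : PySem.Dict String Int)
    (can : PySem.Dict String String) (ord : PySem.Dict String Int)
    (h : can.keys = ord.keys) :
    L.foldl (fun s p =>
        if s.2.1.contains (PySem.Str.lower p.2) then
          (s.1.modify (PySem.Str.lower p.2) 0 (· + 1), s.2.1, s.2.2)
        else
          (s.1.modify (PySem.Str.lower p.2) 0 (· + 1),
           s.2.1.insert (PySem.Str.lower p.2) p.2,
           s.2.2.insert (PySem.Str.lower p.2) p.1)) (c, can, ord)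
    = (L.foldl (fun d p => d.modify (PySem.Str.lower p.2) 0 (· + 1)) c,
       L.foldl (fun d p => d.setdefault (PySem.Str.lower p.2) p.2) can,
       L.foldl (fun d p => d.setdefault (PySem.Str.lower p.2) p.1) ord) := by
  induction L generalizing c can ord with
  | nil => rfl
  | cons p rest ih =>
    simp only [List.foldl_cons]
    by_cases hc : can.contains (PySem.Str.lower p.2) = true
    · have ho : ord.contains (PySem.Str.lower p.2) = true :=
        (PySem.Dict.contains_iff_mem_keys _ _).mpr
          (h ▸ (PySem.Dict.contains_iff_mem_keys _ _).mp hc)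
      rw [if_pos hc]
      rw [PySem.Dict.setdefault_of_contains _ _ hc,
        PySem.Dict.setdefault_of_contains _ _ ho]
      exact ih _ _ _ h
    · have hc' : can.contains (PySem.Str.lower p.2) = false := by simpa using hc
      have ho' : ord.contains (PySem.Str.lower p.2) = false := by
        by_contra hx
        simp only [Bool.not_eq_false] at hx
        exact hc ((PySem.Dict.contains_iff_mem_keys _ _).mpr
          (h ▸ (PySem.Dict.contains_iff_mem_keys _ _).mp hx))
      rw [if_neg (by simp [hc'])]
      rw [PySem.Dict.setdefault_of_not_contains _ _ hc',
        PySem.Dict.setdefault_of_not_contains _ _ ho']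
      exact ih _ _ _ (by
        rw [PySem.Dict.keys_insert_of_not_contains _ _ hc',
          PySem.Dict.keys_insert_of_not_contains _ _ ho', h])

theorem pvFindFilter {α : Type} (q : α → Bool) (L : List α) :
    L.find? q = (L.filter q).head? := by
  induction L with
  | nil => rfl
  | cons x xs ih =>
    by_cases hx : q x = true
    · rw [List.find?_cons_of_pos hx, List.filter_cons_of_pos hx, List.head?_cons]
    · rw [List.find?_cons_of_neg (by simpa using hx), List.filter_cons_of_neg (by simpa using hx), ih]

theorem pvPyGetDZero {α : Type} (xs : List α) (d : α) :
    PySem.List.pyGetD xs 0 d = xs.headD d := by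
  cases xs <;> simp [PySem.List.pyGetD, PySem.List.pyGet?, PySem.List.pyIdx?]

def pgroups (tags : List String) : PySem.Dict String (List (Int × String)) :=
  (PySem.List.enumerate tags 0).foldl
    (fun g p => g.modify (PySem.Str.lower p.2) [] (· ++ [p])) PySem.Dict.empty

theorem pvGroupsKeys (tags : List String) :
    (pgroups tags).keys
      = PySem.Set.ofList ((PySem.List.enumerate tags 0).map (fun p => PySem.Str.lower p.2)) := by
  unfold pgroups
  rw [PySem.Dict.keys_foldl_modify_key (PySem.List.enumerate tags 0)
    (fun p => PySem.Str.lower p.2) [] (fun _ p => (· ++ [p])) PySem.Dict.empty]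
  simp [PySem.Set.update_nil_left]

theorem pvGroupsGetD (tags : List String) (k : String) :
    (pgroups tags).getD k []
      = (PySem.List.enumerate tags 0).filter (fun p => PySem.Str.lower p.2 == k) := by
  unfold pgroups
  rw [show (PySem.List.enumerate tags 0).foldl
      (fun g p => g.modify (PySem.Str.lower p.2) [] (· ++ [p])) PySem.Dict.empty
    = ((PySem.List.enumerate tags 0).map (fun p => (PySem.Str.lower p.2, p))).foldl
      (fun d q => d.modify q.1 [] (· ++ [q.2])) PySem.Dict.empty from
    (List.foldl_map (f := fun p : Int × String => (PySem.Str.lower p.2, p))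
      (g := fun (d : PySem.Dict String (List (Int × String))) q => d.modify q.1 [] (· ++ [q.2]))).symm]
  rw [PySem.Dict.getD_foldl_modify_append]
  simp [List.filter_map, Function.comp_def, List.map_map]

theorem pvCountsGetD (tags : List String) (k : String) :
    ((PySem.List.enumerate tags 0).foldl
        (fun d p => d.modify (PySem.Str.lower p.2) 0 (· + 1))
        (PySem.Dict.empty : PySem.Dict String Int)).getD k 0
      = (((PySem.List.enumerate tags 0).filter (fun p => PySem.Str.lower p.2 == k)).length : Int) := by
  rw [show (PySem.List.enumerate tags 0).foldl
      (fun d p => d.modify (PySem.Str.lower p.2) 0 (· + 1))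
      (PySem.Dict.empty : PySem.Dict String Int)
    = ((PySem.List.enumerate tags 0).map (fun p => PySem.Str.lower p.2)).foldl
      (fun d x => d.modify x 0 (· + 1)) PySem.Dict.empty from
    (List.foldl_map (f := fun p : Int × String => PySem.Str.lower p.2)
      (g := fun (d : PySem.Dict String Int) x => d.modify x 0 (· + 1))).symm]
  rw [PySem.Dict.getD_foldl_modify_add_one]
  simp only [PySem.Dict.getD_empty, List.count_eq_countP, zero_add,
    List.countP_eq_length_filter, Function.comp_def, List.filter_map, List.length_map]

theorem pvCountsKeys (tags : List String) :
    ((PySem.List.enumerate tags 0).foldl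
        (fun d p => d.modify (PySem.Str.lower p.2) 0 (· + 1))
        (PySem.Dict.empty : PySem.Dict String Int)).keys
      = PySem.Set.ofList ((PySem.List.enumerate tags 0).map (fun p => PySem.Str.lower p.2)) := by
  rw [PySem.Dict.keys_foldl_modify_key (PySem.List.enumerate tags 0)
    (fun p => PySem.Str.lower p.2) 0 (fun _ _ => (· + 1)) PySem.Dict.empty]
  simp [PySem.Set.update_nil_left]

theorem pvSetdefaultKeys {ν : Type} (v : (Int × String) → ν) (tags : List String) :
    ((PySem.List.enumerate tags 0).foldl
        (fun d p => d.setdefault (PySem.Str.lower p.2) (v p)) PySem.Dict.empty).keys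
      = PySem.Set.ofList ((PySem.List.enumerate tags 0).map (fun p => PySem.Str.lower p.2)) := by
  rw [pvKeysSetdefault]
  simp [PySem.Set.update_nil_left]

theorem pvValAt {ν : Type} (v : (Int × String) → ν) (dflt : ν) (tags : List String) (k : String)
    (hk : k ∈ PySem.Set.ofList ((PySem.List.enumerate tags 0).map (fun p => PySem.Str.lower p.2))) :
    ((PySem.List.enumerate tags 0).foldl
        (fun d p => d.setdefault (PySem.Str.lower p.2) (v p)) PySem.Dict.empty).getD k dflt
      = v (PySem.List.pyGetD ((pgroups tags).getD k []) 0 (0, "")) := by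
  rw [PySem.Dict.getD_eq_get?_getD, pvGetSetdefault, PySem.Dict.get?_empty,
    pvFindFilter, pvGroupsGetD, pvPyGetDZero]
  rw [PySem.Set.mem_ofList] at hk
  obtain ⟨p, hpL, hpk⟩ := List.mem_map.mp hk
  have hpF : p ∈ (PySem.List.enumerate tags 0).filter (fun p => PySem.Str.lower p.2 == k) :=
    List.mem_filter.mpr ⟨hpL, by simp [hpk]⟩
  cases hF : (PySem.List.enumerate tags 0).filter (fun p => PySem.Str.lower p.2 == k) with
  | nil => rw [hF] at hpF; cases hpF
  | cons a rest => simp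

theorem pvMain (tags : List String) : build_casefold_tags tags = build_casefold_tags_alt tags := by
  simp only [build_casefold_tags, build_casefold_tags_alt]
  rw [pvAfold _ _ _ _ rfl]
  have hnK : (PySem.Set.ofList ((PySem.List.enumerate tags 0).map
      (fun p => PySem.Str.lower p.2))).Nodup := PySem.Set.nodup_ofList _
  have hnG : (pgroups tags).keys.Nodup := by rw [pvGroupsKeys]; exact hnK
  have hG : (pgroups tags).items
      = ((PySem.List.enumerate tags 0).map (fun p => PySem.Str.lower p.2) |> PySem.Set.ofList).map
        (fun k => (k, (pgroups tags).getD k [])) := by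
    rw [PySem.Dict.items_eq_map_keys (pgroups tags) hnG [], pvGroupsKeys]
  have hfold : (PySem.List.enumerate tags 0).foldl
      (fun g p => g.modify (PySem.Str.lower p.2) [] (· ++ [p])) PySem.Dict.empty = pgroups tags := rfl
  simp only [Prod.mk.injEq]
  refine ⟨?_, ?_, ?_⟩
  · rw [PySem.Dict.items_eq_map_keys _ (by rw [pvCountsKeys]; exact hnK) 0, pvCountsKeys]
    rw [hfold, hG, List.map_map]
    refine List.map_congr_left (fun k hk => ?_)
    simp only [Function.comp_def, pvCountsGetD, pvGroupsGetD]
  · rw [PySem.Dict.items_eq_map_keys _ (by rw [pvSetdefaultKeys]; exact hnK) "", pvSetdefaultKeys]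
    rw [hfold, hG, List.map_map]
    refine List.map_congr_left (fun k hk => ?_)
    simp only [Function.comp_def, Prod.mk.injEq, true_and]
    rw [pvValAt (fun p => p.2) "" tags k hk]
  · rw [PySem.Dict.items_eq_map_keys _ (by rw [pvSetdefaultKeys]; exact hnK) 0, pvSetdefaultKeys]
    rw [hfold, hG, List.map_map]
    refine List.map_congr_left (fun k hk => ?_)
    simp only [Function.comp_def, Prod.mk.injEq, true_and]
    rw [pvValAt (fun p => p.1) 0 tags k hk]

-- ===== VERDICT (by name: the statement is the Claim_ definition above) =====
theorem build_casefold_tags_spec : Claim_equal_build_casefold_tags := by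
  intro tags _
  show build_casefold_tags tags = build_casefold_tags_alt tags
  exact pvMain tags
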